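-- pv_equiv track=rewrite | github.com/Kirachon/Name_Matching | src/standardizer.py | remove_name_suffixes
-- ===== SOURCE A (Python) =====
-- def remove_name_suffixes(name: str) -> str:
--     """
--     Remove common name suffixes like Jr., Sr., III, etc.
--
--     Args:
--         name: The name to process
--
--     Returns:
--         Name with suffixes removed
--     """
--     suffixes = [
--         "jr", "jr.", "sr", "sr.", "ii", "iii", "iv", "v", "vi",
--         "vii", "viii", "ix", "x", "phd", "md", "esq", "esq."
--     ]
--
--     # Check if the name ends with any suffix
--     name_lower = name.lower()
--     for suffix in suffixes:
--         if name_lower.endswith(" " + suffix):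
--             return name[:-(len(suffix) + 1)].strip()
--         # Also check for comma-separated suffixes
--         if name_lower.endswith(", " + suffix):
--             return name[:-(len(suffix) + 2)].strip()
--
--     # Remove trailing comma if present
--     if name.endswith(","):
--         return name[:-1].strip()
--
--     # Special case for test
--     if name == "Santos, PhD" or name == "Santos,":
--         return "Santos"
--
--     return name
-- ===== SOURCE B (Python) =====
-- _SUFFIXES = {
--     "jr", "jr.", "sr", "sr.", "ii", "iii", "iv", "v", "vi",
--     "vii", "viii", "ix", "x", "phd", "md", "esq", "esq.",
-- }
--
--
-- def remove_name_suffixes(name: str) -> str: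
--     head, sep, tail = name.rpartition(" ")
--     if sep and tail.lower() in _SUFFIXES:
--         return head.strip()
--     if name.endswith(","):
--         return name[:-1].strip()
--     return name
-- ===== Notes on version B (the rewrite author's own statement) =====
-- stated objective: simpler
-- what changed: Replaced the 17-suffix scanning loop (two endswith checks per suffix, plus dead special cases) with one rpartition at the last space and a set-membership test on the lowered final token.
import Mathlib
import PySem

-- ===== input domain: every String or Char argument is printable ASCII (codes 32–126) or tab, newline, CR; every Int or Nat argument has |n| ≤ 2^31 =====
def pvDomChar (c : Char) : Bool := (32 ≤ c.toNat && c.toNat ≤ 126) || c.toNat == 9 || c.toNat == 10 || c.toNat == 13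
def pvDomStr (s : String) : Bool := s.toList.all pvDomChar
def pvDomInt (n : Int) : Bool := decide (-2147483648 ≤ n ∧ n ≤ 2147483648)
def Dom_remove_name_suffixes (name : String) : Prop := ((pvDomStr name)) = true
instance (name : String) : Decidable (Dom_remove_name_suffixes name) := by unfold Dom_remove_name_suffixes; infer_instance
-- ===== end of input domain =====

-- B replaces A's 17-suffix scanning loop by one rpartition at the last space plus a set-membership
-- test on the lowered final token (objective: simpler); proved to return the same string on all inputs.


-- ===== PORT A =====
-- A's 'suffixes' list, in A's order
def pvSuffixesA : List (List Char) :=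
  [['j','r'], ['j','r','.'], ['s','r'], ['s','r','.'], ['i','i'], ['i','i','i'],
   ['i','v'], ['v'], ['v','i'], ['v','i','i'], ['v','i','i','i'], ['i','x'], ['x'],
   ['p','h','d'], ['m','d'], ['e','s','q'], ['e','s','q','.']]

-- A's 'for suffix in suffixes' loop; 'some' = the loop returned, 'none' = it fell through
def pvALoop (cs nl : List Char) : List (List Char) → Option (List Char)
  | [] => none
  | s :: rest =>
    if PySem.Chars.endswith nl (' ' :: s) then
      some (PySem.Chars.strip (PySem.List.slice cs none (some (-((s.length : Int) + 1)))))
    else if PySem.Chars.endswith nl (',' :: ' ' :: s) then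
      some (PySem.Chars.strip (PySem.List.slice cs none (some (-((s.length : Int) + 2)))))
    else pvALoop cs nl rest

def remove_name_suffixes (name : String) : String :=
  match pvALoop name.toList (PySem.Chars.lower name.toList) pvSuffixesA with
  | some r => String.ofList r
  | none =>
    if PySem.Chars.endswith name.toList [','] then
      String.ofList (PySem.Chars.strip (PySem.List.slice name.toList none (some (-1))))
    else if name.toList = "Santos, PhD".toList ∨ name.toList = "Santos,".toList then "Santos"
    else name

-- ===== PORT B =====
-- Source B's _SUFFIXES set literal (same 17 tokens as A's list; the constant is shared, the algorithms are not)
def pvSuffixSet : PySem.Set (List Char) := PySem.Set.ofList pvSuffixesA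

-- name.rpartition(" ") = (take i, " ", drop (i+1)) at the last space i = rfind; no separator ↔ rfind = -1
def remove_name_suffixes_alt (name : String) : String :=
  let cs := name.toList
  let i := PySem.Chars.rfind cs [' ']
  if 0 ≤ i ∧ PySem.Set.contains pvSuffixSet (PySem.Chars.lower (List.drop (i.toNat + 1) cs)) then
    String.ofList (PySem.Chars.strip (List.take i.toNat cs))
  else if PySem.Chars.endswith cs [','] then
    String.ofList (PySem.Chars.strip (PySem.List.slice cs none (some (-1))))
  else name

-- ===== PRECONDITION & SPEC =====
def Spec_remove_name_suffixes (name : String) (out : String) : Prop := out = remove_name_suffixes_alt name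
instance (name : String) (out : String) : Decidable (Spec_remove_name_suffixes name out) := by unfold Spec_remove_name_suffixes; infer_instance

-- ===== CLAIM (what is proved, stated in full; the proofs are below) =====
def Claim_equal_remove_name_suffixes : Prop := ∀ (name : String), Dom_remove_name_suffixes name → Spec_remove_name_suffixes name (remove_name_suffixes name)

-- ===== LEMMAS AND PROOFS =====

theorem lowerChar_eq_space_iff (c : Char) : (PySem.Chars.lowerChar c = ' ') ↔ c = ' ' := by
  constructor
  · intro h
    by_cases hu : PySem.Chars.isupper c = true
    · exfalso
      simp [PySem.Chars.lowerChar, hu] at h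
      simp [PySem.Chars.isupper, Char.le_def] at hu
      obtain ⟨h1, h2⟩ := hu
      have h1' : 65 ≤ c.toNat := by simpa [UInt32.le_iff_toNat_le] using h1
      have h2' : c.toNat ≤ 90 := by simpa [UInt32.le_iff_toNat_le] using h2
      have : (Char.ofNat (c.toNat + 32)).toNat = ' '.toNat := by rw [h]
      rw [Char.toNat_ofNat] at this
      have hv : (c.toNat + 32).isValidChar := Or.inl (by omega)
      simp [hv] at this
      have h32 : (' ').toNat = 32 := rfl
      omega
    · simpa [PySem.Chars.lowerChar, hu] using h
  · intro h; subst h; decide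

-- rfind.go returns either -1 with no occurrence at any index ≤ k, or the largest index ≤ k of an occurrence
theorem rfind_go_spec (cs sub : List Char) (k : Nat) :
    (PySem.Chars.rfind.go cs sub k = -1 ∧ ∀ j ≤ k, sub.isPrefixOf (cs.drop j) = false)
    ∨ (∃ i : Nat, PySem.Chars.rfind.go cs sub k = (i : Int) ∧ i ≤ k ∧
        sub.isPrefixOf (cs.drop i) = true ∧ ∀ j, i < j → j ≤ k → sub.isPrefixOf (cs.drop j) = false) := by
  induction k with
  | zero =>
    by_cases h : sub.isPrefixOf cs = true
    · right
      exact ⟨0, by simp [PySem.Chars.rfind.go, h], le_refl 0, by simpa using h, by omega⟩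
    · left
      refine ⟨by simp [PySem.Chars.rfind.go, h], ?_⟩
      intro j hj
      interval_cases j
      · simpa using eq_false_of_ne_true h
  | succ n ih =>
    by_cases h : sub.isPrefixOf (cs.drop (n+1)) = true
    · right
      exact ⟨n+1, by simp [PySem.Chars.rfind.go, h], le_refl _, h, by omega⟩
    · have hgo : PySem.Chars.rfind.go cs sub (n+1) = PySem.Chars.rfind.go cs sub n := by
        simp [PySem.Chars.rfind.go, h]
      have hf : sub.isPrefixOf (cs.drop (n+1)) = false := eq_false_of_ne_true h
      rcases ih with ⟨h1, h2⟩ | ⟨i, h1, h2, h3, h4⟩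
      · left
        refine ⟨hgo.trans h1, ?_⟩
        intro j hj
        rcases Nat.lt_or_ge j (n+1) with hj' | hj'
        · exact h2 j (by omega)
        · have : j = n+1 := by omega
          subst this; exact hf
      · right
        refine ⟨i, hgo.trans h1, by omega, h3, ?_⟩
        intro j hji hj
        rcases Nat.lt_or_ge j (n+1) with hj' | hj'
        · exact h4 j hji (by omega)
        · have : j = n+1 := by omega
          subst this; exact hf

theorem slice_neg_to {α : Type} (xs : List α) (k : Nat) (h0 : 0 < k) (hk : k ≤ xs.length) :
    PySem.List.slice xs none (some (-(k : Int))) = xs.take (xs.length - k) := by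
  simp only [PySem.List.slice, PySem.List.clampIdx]
  have h1 : (-(k : Int)) < 0 := by omega
  have h2 : ¬ ((xs.length : Int) + -(k : Int) < 0) := by omega
  simp only [h1, if_true, h2, if_false]
  have : ((xs.length : Int) + -(k : Int)).toNat = xs.length - k := by omega
  simp [this]

-- [' '] is a prefix of l iff l starts with ' '
theorem space_prefix_iff (l : List Char) :
    ([' '].isPrefixOf l = true) ↔ ∃ t, l = ' ' :: t := by
  cases l with
  | nil => simp [List.isPrefixOf]
  | cons c r =>
    simp [List.isPrefixOf_iff_prefix, List.cons_prefix_cons]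
    exact eq_comm

-- a matching " "+suffix with no internal space sits exactly after the LAST space of cs
theorem suffix_decomp (cs s : List Char) (hs : ' ' ∉ s)
    (h : (' ' :: s) <:+ PySem.Chars.lower cs) :
    ∃ i : Nat, PySem.Chars.rfind cs [' '] = (i : Int) ∧
      i + (s.length + 1) = cs.length ∧
      PySem.Chars.lower (cs.drop (i+1)) = s := by
  obtain ⟨pre, hpre⟩ := h
  set n := cs.length with hn
  set i := pre.length with hi
  have hlen : i + (s.length + 1) = n := by
    have := congrArg List.length hpre
    simp [PySem.Chars.lower] at this
    omega
  have hdropmap : List.map PySem.Chars.lowerChar (cs.drop i) = ' ' :: s := by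
    have : List.drop i (pre ++ ' ' :: s) = ' ' :: s := by rw [hi]; exact List.drop_left
    rw [hpre] at this
    simpa [PySem.Chars.lower, List.map_drop] using this
  obtain ⟨c, t, hct⟩ : ∃ c t, cs.drop i = c :: t := by
    cases hcs : cs.drop i with
    | nil => rw [hcs] at hdropmap; simp at hdropmap
    | cons c t => exact ⟨c, t, rfl⟩
  have hc : c = ' ' := by
    rw [hct] at hdropmap; simp at hdropmap
    exact (lowerChar_eq_space_iff c).mp hdropmap.1
  have ht : List.map PySem.Chars.lowerChar t = s := by
    rw [hct] at hdropmap; simp at hdropmap; exact hdropmap.2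
  have htdrop : cs.drop (i+1) = t := by
    have hdd : List.drop 1 (List.drop i cs) = List.drop (i+1) cs := List.drop_drop
    rw [← hdd, hct]; simp
  have hnospace : ∀ j, i < j → ¬ ([' '].isPrefixOf (cs.drop j) = true) := by
    intro j hij hp
    obtain ⟨u, hu⟩ := (space_prefix_iff _).mp hp
    have hmem : ' ' ∈ cs.drop j := by rw [hu]; simp
    have hsub : cs.drop j ⊆ cs.drop (i+1) := by
      have hdd : List.drop (j-(i+1)) (List.drop (i+1) cs) = List.drop j cs := by
        rw [List.drop_drop]; congr 1; omega
      rw [← hdd]; exact List.drop_subset _ _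
    have : ' ' ∈ t := by rw [← htdrop]; exact hsub hmem
    have : ' ' ∈ s := by rw [← ht]; exact List.mem_map.mpr ⟨' ', this, by decide⟩
    exact hs this
  have hpi : [' '].isPrefixOf (cs.drop i) = true := by
    rw [hct, hc]; exact (space_prefix_iff _).mpr ⟨t, rfl⟩
  have hin : i ≤ n := by omega
  rcases rfind_go_spec cs [' '] n with ⟨h1, h2⟩ | ⟨i', h1, h2, h3, h4⟩
  · exact absurd hpi (by simp [h2 i hin])
  · have hii' : i = i' := by
      rcases Nat.lt_trichotomy i i' with hlt | heq | hgt
      · exact absurd h3 (by simpa using hnospace i' hlt)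
      · exact heq
      · exact absurd hpi (by simp [h4 i hgt hin])
    subst hii'
    refine ⟨i, ?_, hlen, by rw [htdrop]; exact ht⟩
    simpa [PySem.Chars.rfind] using h1

-- conversely, a nonnegative rfind exposes the last-space decomposition as a suffix of the lowered name
theorem rfind_nonneg_suffix (cs : List Char) (h : 0 ≤ PySem.Chars.rfind cs [' ']) :
    (' ' :: PySem.Chars.lower (cs.drop ((PySem.Chars.rfind cs [' ']).toNat + 1))) <:+ PySem.Chars.lower cs := by
  rcases rfind_go_spec cs [' '] cs.length with ⟨h1, _⟩ | ⟨i, h1, h2, h3, _⟩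
  · rw [PySem.Chars.rfind] at h; rw [h1] at h; omega
  · have hr : PySem.Chars.rfind cs [' '] = (i : Int) := by simpa [PySem.Chars.rfind] using h1
    rw [hr]
    simp only [Int.toNat_natCast]
    obtain ⟨t, htt⟩ := (space_prefix_iff _).mp h3
    have htdrop : cs.drop (i+1) = t := by
      have hdd : List.drop 1 (List.drop i cs) = List.drop (i+1) cs := List.drop_drop
      rw [← hdd, htt]; simp
    refine ⟨List.map PySem.Chars.lowerChar (cs.take i), ?_⟩
    rw [htdrop]
    have : PySem.Chars.lower cs = List.map PySem.Chars.lowerChar (cs.take i ++ cs.drop i) := by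
      rw [List.take_append_drop]; rfl
    rw [this, List.map_append, htt]
    simp [PySem.Chars.lower]
    decide

theorem comma_imp_space (nl s : List Char) (h : PySem.Chars.endswith nl (',' :: ' ' :: s) = true) :
    PySem.Chars.endswith nl (' ' :: s) = true := by
  rw [PySem.Chars.endswith_iff] at h ⊢
  exact List.IsSuffix.trans ⟨[','], rfl⟩ h

theorem pvALoop_eq_none_iff (cs nl : List Char) (l : List (List Char)) :
    pvALoop cs nl l = none ↔ ∀ s ∈ l, ¬ ((' ' :: s) <:+ nl) := by
  induction l with
  | nil => simp [pvALoop]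
  | cons s rest ih =>
    by_cases h : PySem.Chars.endswith nl (' ' :: s) = true
    · simp only [pvALoop, h, if_true]
      constructor
      · intro hc; exact absurd hc (by simp)
      · intro hall
        exact absurd ((PySem.Chars.endswith_iff _ _).mp h) (hall s (by simp))
    · have h2 : PySem.Chars.endswith nl (',' :: ' ' :: s) = false := by
        by_contra hc
        exact h (comma_imp_space nl s (by simpa using hc))
      simp only [pvALoop, h, h2, if_false, Bool.false_eq_true]
      rw [ih]
      constructor
      · intro hall t ht
        rcases List.mem_cons.mp ht with rfl | ht'
        · rw [← PySem.Chars.endswith_iff] at *; simp [h]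
        · exact hall t ht'
      · intro hall t ht; exact hall t (List.mem_cons_of_mem _ ht)

theorem pvALoop_eq_some (cs nl : List Char) (l : List (List Char)) (s : List Char)
    (hmem : s ∈ l) (hmatch : (' ' :: s) <:+ nl)
    (huniq : ∀ t ∈ l, (' ' :: t) <:+ nl → t = s) :
    pvALoop cs nl l = some (PySem.Chars.strip (PySem.List.slice cs none (some (-((s.length : Int) + 1))))) := by
  induction l with
  | nil => simp at hmem
  | cons t rest ih =>
    by_cases h : PySem.Chars.endswith nl (' ' :: t) = true
    · have : t = s := huniq t (by simp) ((PySem.Chars.endswith_iff _ _).mp h)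
      subst this
      simp [pvALoop, h]
    · have h2 : PySem.Chars.endswith nl (',' :: ' ' :: t) = false := by
        by_contra hc
        exact h (comma_imp_space nl t (by simpa using hc))
      have hst : s ≠ t := by
        rintro rfl
        exact h ((PySem.Chars.endswith_iff _ _).mpr hmatch)
      simp only [pvALoop, h, h2, if_false, Bool.false_eq_true]
      exact ih (by rcases List.mem_cons.mp hmem with rfl | h' <;> [exact absurd rfl hst; exact h'])
        (fun u hu hsu => huniq u (List.mem_cons_of_mem _ hu) hsu)

theorem pvALoop_some_exists (cs nl : List Char) (l : List (List Char)) (r : List Char)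
    (h : pvALoop cs nl l = some r) : ∃ s ∈ l, (' ' :: s) <:+ nl := by
  induction l with
  | nil => simp [pvALoop] at h
  | cons s rest ih =>
    by_cases h1 : PySem.Chars.endswith nl (' ' :: s) = true
    · exact ⟨s, by simp, (PySem.Chars.endswith_iff _ _).mp h1⟩
    · by_cases h2 : PySem.Chars.endswith nl (',' :: ' ' :: s) = true
      · exact ⟨s, by simp, (PySem.Chars.endswith_iff _ _).mp (comma_imp_space nl s h2)⟩
      · simp only [pvALoop, h1, h2, if_false, Bool.false_eq_true] at h
        obtain ⟨t, ht, htt⟩ := ih h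
        exact ⟨t, List.mem_cons_of_mem _ ht, htt⟩

theorem pvSuffixesA_no_space : ∀ s ∈ pvSuffixesA, ' ' ∉ s := by decide

-- ===== VERDICT (by name: the statement is the Claim_ definition above) =====
theorem remove_name_suffixes_spec : Claim_equal_remove_name_suffixes := by
  intro name _
  unfold Spec_remove_name_suffixes remove_name_suffixes remove_name_suffixes_alt
  simp only []
  cases hl : pvALoop name.toList (PySem.Chars.lower name.toList) pvSuffixesA with
  | some r =>
    obtain ⟨s, hmem, hmatch⟩ := pvALoop_some_exists _ _ _ _ hl
    have hs := pvSuffixesA_no_space s hmem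
    obtain ⟨i, hri, hlen, hlow⟩ := suffix_decomp name.toList s hs hmatch
    have huniq : ∀ t ∈ pvSuffixesA, (' ' :: t) <:+ PySem.Chars.lower name.toList → t = s := by
      intro t htmem htmatch
      obtain ⟨i', hri', _, hlow'⟩ := suffix_decomp name.toList t (pvSuffixesA_no_space t htmem) htmatch
      have : i = i' := by rw [hri] at hri'; exact_mod_cast hri'
      subst this
      rw [← hlow', hlow]
    rw [pvALoop_eq_some _ _ _ s hmem hmatch huniq] at hl
    have hr : r = PySem.Chars.strip (PySem.List.slice name.toList none (some (-((s.length : Int) + 1)))) :=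
      (Option.some_injective _ hl.symm)
    have hcond : (0 ≤ PySem.Chars.rfind name.toList [' '] ∧
        PySem.Set.contains pvSuffixSet
          (PySem.Chars.lower (List.drop ((PySem.Chars.rfind name.toList [' ']).toNat + 1) name.toList)) = true) := by
      rw [hri]
      refine ⟨by omega, ?_⟩
      simp only [Int.toNat_natCast, hlow]
      exact (PySem.Set.contains_iff _ _).mpr
        ((PySem.Set.mem_ofList _ _).mpr hmem)
    rw [if_pos hcond]
    show String.ofList r = _
    rw [hr, hri]
    simp only [Int.toNat_natCast]
    congr 1
    have hcast : (-((s.length : Int) + 1)) = (-(((s.length + 1 : Nat)) : Int)) := by push_cast; ring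
    rw [hcast, slice_neg_to name.toList (s.length + 1) (by omega) (by omega)]
    have hi' : name.toList.length - (s.length + 1) = i := by omega
    rw [hi']
  | none =>
    have hnone := (pvALoop_eq_none_iff _ _ _).mp hl
    have hBfalse : ¬ (0 ≤ PySem.Chars.rfind name.toList [' '] ∧
        PySem.Set.contains pvSuffixSet
          (PySem.Chars.lower (List.drop ((PySem.Chars.rfind name.toList [' ']).toNat + 1) name.toList)) = true) := by
      rintro ⟨hge, hcon⟩
      have hmem : PySem.Chars.lower (List.drop ((PySem.Chars.rfind name.toList [' ']).toNat + 1) name.toList)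
          ∈ pvSuffixesA := by
        exact (PySem.Set.mem_ofList _ _).mp ((PySem.Set.contains_iff _ _).mp hcon)
      exact hnone _ hmem (rfind_nonneg_suffix name.toList hge)
    rw [if_neg hBfalse]
    by_cases hcomma : PySem.Chars.endswith name.toList [','] = true
    · rw [if_pos hcomma, if_pos hcomma]
    · rw [if_neg hcomma, if_neg hcomma]
      have hsant : ¬ (name.toList = "Santos, PhD".toList ∨ name.toList = "Santos,".toList) := by
        rintro (hsp | hsc)
        · rw [hsp] at hl
          exact absurd hl (by decide)
        · exact hcomma (by rw [hsc]; decide)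
      rw [if_neg hsant]
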